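-- pv_equiv track=rewrite | github.com/jeury301/python-morsels | 14. lstrip/lstrip_solutions.py | v3_lstrip
-- ===== SOURCE A (Python) =====
-- def v3_lstrip(iterable, strip_value):
--     """Return iterable with strip_value items removed from beginning."""
--     stripped = []
--     iterator = iter(iterable)
--     for item in iterator:
--         if not item == strip_value:
--             stripped.append(item)
--             break
--     for item in iterator:
--         stripped.append(item)
--     return stripped
-- ===== SOURCE B (Python) =====
-- def v3_lstrip(iterable, strip_value):
--     """Return iterable with strip_value items removed from beginning."""
--     stripped = []
--     stripping = True
--     for item in iterable:
--         if stripping and item == strip_value: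
--             continue
--         stripping = False
--         stripped.append(item)
--     return stripped
-- ===== Notes on version B (the rewrite author's own statement) =====
-- stated objective: alternative
-- what changed: Replaces A's two phased loops over a shared iterator with a single fold over the whole list that carries a 'stripping' boolean flag and an accumulator.
import Mathlib
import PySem

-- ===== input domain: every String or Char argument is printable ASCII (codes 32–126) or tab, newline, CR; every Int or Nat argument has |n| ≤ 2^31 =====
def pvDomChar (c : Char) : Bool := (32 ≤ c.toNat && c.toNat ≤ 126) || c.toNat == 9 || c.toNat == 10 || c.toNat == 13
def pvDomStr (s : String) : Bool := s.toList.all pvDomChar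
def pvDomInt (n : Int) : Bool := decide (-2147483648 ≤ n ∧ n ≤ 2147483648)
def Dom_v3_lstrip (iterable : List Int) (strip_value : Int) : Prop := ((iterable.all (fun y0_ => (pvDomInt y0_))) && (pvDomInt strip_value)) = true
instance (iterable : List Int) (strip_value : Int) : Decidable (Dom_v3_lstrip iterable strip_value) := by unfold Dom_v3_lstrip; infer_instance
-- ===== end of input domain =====

-- B replaces A's two phased loops over a shared iterator with one pass over the whole
-- list carrying a boolean 'stripping' flag and an accumulator; objective: alternative.


-- ===== PORT A =====
-- First loop: consume items while they equal strip_value; on the first item with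
-- `not item == strip_value`, append it and break.  Second loop: append everything
-- left in the shared iterator, which is the remaining tail `xs`.
def v3_lstrip_loop1 (iterator : List Int) (strip_value : Int) : List Int :=
  match iterator with
  | [] => []
  | x :: xs => if !(x == strip_value) then x :: xs else v3_lstrip_loop1 xs strip_value

def v3_lstrip (iterable : List Int) (strip_value : Int) : List Int :=
  v3_lstrip_loop1 iterable strip_value

-- ===== PORT B =====
-- Source B's loop body: state is (stripping flag, stripped list); `continue` keeps the
-- state, otherwise the flag drops to false and the item is appended.
def v3_lstrip_alt_step (strip_value : Int) (st : Bool × List Int) (item : Int) : Bool × List Int :=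
  if st.1 && (item == strip_value) then st else (false, st.2 ++ [item])

def v3_lstrip_alt (iterable : List Int) (strip_value : Int) : List Int :=
  (iterable.foldl (v3_lstrip_alt_step strip_value) (true, [])).2

-- ===== PRECONDITION & SPEC =====
def Spec_v3_lstrip (iterable : List Int) (strip_value : Int) (out : List Int) : Prop := out = v3_lstrip_alt iterable strip_value
instance (iterable : List Int) (strip_value : Int) (out : List Int) : Decidable (Spec_v3_lstrip iterable strip_value out) := by unfold Spec_v3_lstrip; infer_instance

-- ===== CLAIM (what is proved, stated in full; the proofs are below) =====
def Claim_equal_v3_lstrip : Prop := ∀ (iterable : List Int) (strip_value : Int), Dom_v3_lstrip iterable strip_value → Spec_v3_lstrip iterable strip_value (v3_lstrip iterable strip_value)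

-- ===== LEMMAS AND PROOFS =====
theorem alt_fold_false (s : Int) (l : List Int) (acc : List Int) :
    (l.foldl (v3_lstrip_alt_step s) (false, acc)).2 = acc ++ l := by
  induction l generalizing acc with
  | nil => simp
  | cons x xs ih => simp [v3_lstrip_alt_step, ih]

theorem alt_fold_true (s : Int) (l : List Int) (acc : List Int) :
    (l.foldl (v3_lstrip_alt_step s) (true, acc)).2 = acc ++ v3_lstrip_loop1 l s := by
  induction l generalizing acc with
  | nil => simp [v3_lstrip_loop1]
  | cons x xs ih =>
    simp only [List.foldl, v3_lstrip_alt_step, v3_lstrip_loop1]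
    by_cases h : x == s
    · simp [h, ih]
    · simp [h, alt_fold_false]

-- ===== VERDICT (by name: the statement is the Claim_ definition above) =====
theorem v3_lstrip_spec : Claim_equal_v3_lstrip := by
  intro iterable strip_value _
  unfold Spec_v3_lstrip v3_lstrip v3_lstrip_alt
  rw [alt_fold_true]
  simp
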